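-- pv_equiv track=rewrite | github.com/jswooo/Algorithm_and_SQL | 프로그래머스/lv1/42840. 모의고사/모의고사.py | solution
-- ===== SOURCE A (Python) =====
-- def solution(answers):
--     s1, s2, s3 = 0, 0, 0
--     ans = []
--     num1 = [1,2,3,4,5]*2000
--     num2 = [2, 1, 2, 3, 2, 4, 2, 5] * 1250
--     num3 = [3, 3, 1, 1, 2, 2, 4, 4, 5, 5] * 1000
--
--     for i in range(len(answers)):
--         if answers[i] == num1[i]:
--             s1 += 1
--         if answers[i] == num2[i]:
--             s2 += 1
--         if answers[i] == num3[i]: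
--             s3 += 1
--
--     m = max(s1, s2, s3)
--
--     if m == s1:
--         ans.append(1)
--     if m == s2:
--         ans.append(2)
--     if m == s3:
--         ans.append(3)
--
--     return ans
-- ===== SOURCE B (Python) =====
-- def solution(answers):
--     # Histogram approach: one pass builds a counter keyed by (position mod 40, answer);
--     # 40 = lcm of the pattern periods, so each bucket determines all three pattern values.
--     cnt = {}
--     for i, a in enumerate(answers):
--         key = (i % 40, a)
--         cnt[key] = cnt.get(key, 0) + 1
--     patterns = [[1, 2, 3, 4, 5],
--                 [2, 1, 2, 3, 2, 4, 2, 5],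
--                 [3, 3, 1, 1, 2, 2, 4, 4, 5, 5]]
--     scores = [sum(cnt.get((j, p[j % len(p)]), 0) for j in range(40)) for p in patterns]
--     m = max(scores)
--     return [idx + 1 for idx, sc in enumerate(scores) if sc == m]
-- ===== Notes on version B (the rewrite author's own statement) =====
-- stated objective: alternative
-- what changed: Replaces A's fused per-element pass with three counters against three hard-coded 10000-element lists by a histogram algorithm: one pass builds a dict keyed by (index mod 40, answer) (40 = lcm of the pattern periods), then each pattern's score is a 40-bucket lookup sum, so no per-element comparison against any pattern remains.
import Mathlib
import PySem

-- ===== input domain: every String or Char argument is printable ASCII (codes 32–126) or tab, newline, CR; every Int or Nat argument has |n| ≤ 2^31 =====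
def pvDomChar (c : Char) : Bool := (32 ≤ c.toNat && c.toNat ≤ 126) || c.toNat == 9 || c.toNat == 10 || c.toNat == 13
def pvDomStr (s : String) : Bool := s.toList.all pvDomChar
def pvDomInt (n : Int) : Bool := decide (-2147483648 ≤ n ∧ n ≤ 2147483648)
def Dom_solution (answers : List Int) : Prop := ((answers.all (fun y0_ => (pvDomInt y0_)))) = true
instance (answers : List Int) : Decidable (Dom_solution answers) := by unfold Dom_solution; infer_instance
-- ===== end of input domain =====

-- B replaces A's fused per-element pass (three counters vs three hard-coded 10000-element
-- lists) by a histogram: one pass builds a counter keyed by (index mod 40, answer), then each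
-- pattern's score is a 40-bucket lookup sum (objective: alternative; same asymptotic cost).


-- ===== PORT A =====
-- num1 = [1,2,3,4,5]*2000, num2 = [2,1,2,3,2,4,2,5]*1250, num3 = [3,3,1,1,2,2,4,4,5,5]*1000
def pvNum1 : List Int := (List.replicate 2000 ([1,2,3,4,5] : List Int)).flatten
def pvNum2 : List Int := (List.replicate 1250 ([2,1,2,3,2,4,2,5] : List Int)).flatten
def pvNum3 : List Int := (List.replicate 1000 ([3,3,1,1,2,2,4,4,5,5] : List Int)).flatten

def solution (answers : List Int) : List Int :=
  -- for i in range(len(answers)): three independent ifs bumping (s1, s2, s3) from (0, 0, 0)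
  let st : Int × Int × Int :=
    (PySem.List.pyRange 0 (answers.length : Int) 1).foldl
      (fun (s : Int × Int × Int) i =>
        let x := PySem.List.pyGetD answers i 0
        let s1 := if x = PySem.List.pyGetD pvNum1 i 0 then s.1 + 1 else s.1
        let s2 := if x = PySem.List.pyGetD pvNum2 i 0 then s.2.1 + 1 else s.2.1
        let s3 := if x = PySem.List.pyGetD pvNum3 i 0 then s.2.2 + 1 else s.2.2
        (s1, s2, s3)) (0, 0, 0)
  -- m = max(s1, s2, s3); then the three conditional appends
  let m := max st.1 (max st.2.1 st.2.2)
  let ans : List Int := if m = st.1 then [1] else []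
  let ans := if m = st.2.1 then ans ++ [2] else ans
  let ans := if m = st.2.2 then ans ++ [3] else ans
  ans

-- ===== PORT B =====
-- cnt = {}; for i, a in enumerate(answers): key = (i % 40, a); cnt[key] = cnt.get(key, 0) + 1
def pvCnt (answers : List Int) : PySem.Dict (Int × Int) Int :=
  (PySem.List.enumerate answers 0).foldl
    (fun d ia =>
      let key : Int × Int := (PySem.Int.mod ia.1 40, ia.2)
      d.insert key (d.getD key 0 + 1)) PySem.Dict.empty

-- sum(cnt.get((j, p[j % len(p)]), 0) for j in range(40))
def pvPatScore (cnt : PySem.Dict (Int × Int) Int) (p : List Int) : Int :=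
  (PySem.List.pyRange 0 40 1).foldl
    (fun acc j => acc + cnt.getD (j, PySem.List.pyGetD p (PySem.Int.mod j (p.length : Int)) 0) 0) 0

def solution_alt (answers : List Int) : List Int :=
  let cnt := pvCnt answers
  let patterns : List (List Int) := [[1,2,3,4,5],[2,1,2,3,2,4,2,5],[3,3,1,1,2,2,4,4,5,5]]
  let scores : List Int := patterns.map (fun p => pvPatScore cnt p)
  let m := ((PySem.List.max? scores (fun x => x)).getD 0)
  ((PySem.List.enumerate scores 0).filter (fun x => x.2 = m)).map (fun x => x.1 + 1)

-- ===== PRECONDITION & SPEC =====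
-- Pre_ excludes lists longer than 10000, on which A raises IndexError indexing its fixed lists.
def Pre_solution (answers : List Int) : Prop := answers.length ≤ 10000
instance (answers : List Int) : Decidable (Pre_solution answers) := by unfold Pre_solution; infer_instance
def pvWitness_solution : List Int := [1, 2, 3, 1, 5]
def Spec_solution (answers : List Int) (out : List Int) : Prop := out = solution_alt answers
instance (answers : List Int) (out : List Int) : Decidable (Spec_solution answers out) := by unfold Spec_solution; infer_instance

-- ===== CLAIM (what is proved, stated in full; the proofs are below) =====
def Claim_equal_solution : Prop := ∀ (answers : List Int), Dom_solution answers → Pre_solution answers → Spec_solution answers (solution answers)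

-- ===== LEMMAS AND PROOFS =====

-- common yardstick both normal forms are reduced to: the modular match count of pattern p
def pvScore (p : List Int) (answers : List Int) : Int :=
  (PySem.List.enumerate answers 0).foldl
    (fun (acc : Int) ia =>
      if ia.2 = PySem.List.pyGetD p (PySem.Int.mod ia.1 (p.length : Int)) 0 then acc + 1 else acc) 0

lemma flat_rep_getD (p : List Int) : ∀ (n k : Nat), k < n * p.length →
    ((List.replicate n p).flatten).getD k 0 = p.getD (k % p.length) 0 := by
  intro n
  induction n with
  | zero => intro k hk; simp at hk
  | succ m ih =>
    intro k hk
    have hflat : (List.replicate (m+1) p).flatten = p ++ (List.replicate m p).flatten := by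
      simp [List.replicate_succ]
    rw [hflat]
    by_cases hlt : k < p.length
    · rw [List.getD_append _ _ _ _ hlt, Nat.mod_eq_of_lt hlt]
    · push Not at hlt
      have h0 : 0 < p.length := by
        rcases Nat.eq_zero_or_pos p.length with h | h
        · simp [h] at hk
        · exact h
      have hk' : k - p.length < m * p.length := by
        have h1 : (m+1)*p.length = m*p.length + p.length := by ring
        omega
      have hstep : (p ++ (List.replicate m p).flatten).getD k 0
          = ((List.replicate m p).flatten).getD (k - p.length) 0 := by
        simp [List.getD, List.getElem?_append_right hlt]
      have hmod : (k - p.length) % p.length = k % p.length :=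
        (Nat.mod_eq_sub_mod hlt).symm
      rw [hstep, ih (k - p.length) hk', hmod]

-- score of xs ++ [x]
lemma pvScore_append (p : List Int) (xs : List Int) (x : Int) :
    pvScore p (xs ++ [x]) =
      if x = PySem.List.pyGetD p ((xs.length % p.length : Nat) : Int) 0
      then pvScore p xs + 1 else pvScore p xs := by
  unfold pvScore
  rw [PySem.List.enumerate_append, List.foldl_append]
  simp [PySem.List.enumerate]

-- A's fused loop computes the three modular scores
lemma pvMain : ∀ (l : List Int), l.length ≤ 10000 → ∀ (a b c : Int),
    (PySem.List.pyRange 0 (l.length : Int) 1).foldl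
      (fun (s : Int × Int × Int) i =>
        let x := PySem.List.pyGetD l i 0
        let s1 := if x = PySem.List.pyGetD pvNum1 i 0 then s.1 + 1 else s.1
        let s2 := if x = PySem.List.pyGetD pvNum2 i 0 then s.2.1 + 1 else s.2.1
        let s3 := if x = PySem.List.pyGetD pvNum3 i 0 then s.2.2 + 1 else s.2.2
        (s1, s2, s3)) (a, b, c)
    = (a + pvScore [1,2,3,4,5] l, b + pvScore [2,1,2,3,2,4,2,5] l,
       c + pvScore [3,3,1,1,2,2,4,4,5,5] l) := by
  intro l
  induction l using List.reverseRecOn with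
  | nil => intro _ a b c; simp [pvScore, PySem.List.enumerate]
  | append_singleton xs x ih =>
    intro hlen a b c
    have hxs : xs.length ≤ 10000 := by simp at hlen; omega
    have hn : xs.length < 10000 := by simp at hlen; omega
    have hcast : ((xs ++ [x]).length : Int) = (xs.length : Int) + 1 := by
      simp
    rw [hcast, PySem.List.pyRange_one_succ_right (by positivity), List.foldl_append]
    have hcongr :
        (PySem.List.pyRange 0 (xs.length : Int) 1).foldl
          (fun (s : Int × Int × Int) i =>
            let y := PySem.List.pyGetD (xs ++ [x]) i 0
            let s1 := if y = PySem.List.pyGetD pvNum1 i 0 then s.1 + 1 else s.1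
            let s2 := if y = PySem.List.pyGetD pvNum2 i 0 then s.2.1 + 1 else s.2.1
            let s3 := if y = PySem.List.pyGetD pvNum3 i 0 then s.2.2 + 1 else s.2.2
            (s1, s2, s3)) (a, b, c)
        = (PySem.List.pyRange 0 (xs.length : Int) 1).foldl
          (fun (s : Int × Int × Int) i =>
            let y := PySem.List.pyGetD xs i 0
            let s1 := if y = PySem.List.pyGetD pvNum1 i 0 then s.1 + 1 else s.1
            let s2 := if y = PySem.List.pyGetD pvNum2 i 0 then s.2.1 + 1 else s.2.1
            let s3 := if y = PySem.List.pyGetD pvNum3 i 0 then s.2.2 + 1 else s.2.2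
            (s1, s2, s3)) (a, b, c) := by
      apply PySem.List.foldl_congr_mem
      intro acc i hi
      rw [PySem.List.mem_pyRange_one] at hi
      obtain ⟨h0, h1⟩ := hi
      obtain ⟨k, rfl⟩ : ∃ k : Nat, i = (k : Int) := ⟨i.toNat, by omega⟩
      have hlt : k < xs.length := by omega
      simp [PySem.List.pyGetD_natCast, List.getD, List.getElem?_append_left hlt]
    rw [hcongr, ih hxs a b c]
    have hx : PySem.List.pyGetD (xs ++ [x]) ((xs.length : Nat) : Int) 0 = x := by
      simp [PySem.List.pyGetD_natCast]
    have h1 : PySem.List.pyGetD pvNum1 ((xs.length : Nat) : Int) 0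
        = PySem.List.pyGetD ([1,2,3,4,5] : List Int) ((xs.length % 5 : Nat) : Int) 0 := by
      rw [PySem.List.pyGetD_natCast, PySem.List.pyGetD_natCast]
      exact flat_rep_getD [1,2,3,4,5] 2000 xs.length (by simpa using hn)
    have h2 : PySem.List.pyGetD pvNum2 ((xs.length : Nat) : Int) 0
        = PySem.List.pyGetD ([2,1,2,3,2,4,2,5] : List Int) ((xs.length % 8 : Nat) : Int) 0 := by
      rw [PySem.List.pyGetD_natCast, PySem.List.pyGetD_natCast]
      exact flat_rep_getD [2,1,2,3,2,4,2,5] 1250 xs.length (by simpa using hn)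
    have h3 : PySem.List.pyGetD pvNum3 ((xs.length : Nat) : Int) 0
        = PySem.List.pyGetD ([3,3,1,1,2,2,4,4,5,5] : List Int) ((xs.length % 10 : Nat) : Int) 0 := by
      rw [PySem.List.pyGetD_natCast, PySem.List.pyGetD_natCast]
      exact flat_rep_getD [3,3,1,1,2,2,4,4,5,5] 1000 xs.length (by simpa using hn)
    simp only [List.foldl_cons, List.foldl_nil, hx, h1, h2, h3, pvScore_append]
    simp only [List.length_cons, List.length_nil]
    split_ifs <;> simp [add_assoc]

-- the key stream B's counter is built over
def pvKeys (l : List Int) : List (Int × Int) :=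
  (PySem.List.enumerate l 0).map (fun ia => (PySem.Int.mod ia.1 40, ia.2))

lemma pvCnt_getD (l : List Int) (k : Int × Int) :
    (pvCnt l).getD k 0 = ((pvKeys l).count k : Int) := by
  unfold pvCnt pvKeys
  have h : (((PySem.List.enumerate l 0).map (fun ia => (PySem.Int.mod ia.1 40, ia.2))).foldl
        (fun (d : PySem.Dict (Int × Int) Int) key => d.insert key (d.getD key 0 + 1))
        PySem.Dict.empty)
      = (PySem.List.enumerate l 0).foldl
          (fun (d : PySem.Dict (Int × Int) Int) (ia : Int × Int) =>
            d.insert (PySem.Int.mod ia.1 40, ia.2) (d.getD (PySem.Int.mod ia.1 40, ia.2) 0 + 1))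
          PySem.Dict.empty := List.foldl_map
  show (List.foldl (fun (d : PySem.Dict (Int × Int) Int) (ia : Int × Int) =>
      d.insert (PySem.Int.mod ia.1 40, ia.2) (d.getD (PySem.Int.mod ia.1 40, ia.2) 0 + 1))
      PySem.Dict.empty (PySem.List.enumerate l 0)).getD k 0 = _
  rw [← h]
  rw [PySem.Dict.getD_foldl_insert_add_one]
  simp [PySem.Dict.getD_empty]

lemma pvSumInd (g : Int → Int) (x : Int) :
    ∀ (js : List Int) (r : Int), r ∈ js → js.Nodup →
      (js.map (fun j => if (j, g j) = (r, x) then (1:Int) else 0)).sum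
        = if g r = x then 1 else 0 := by
  intro js
  induction js with
  | nil => intro r hr; exact absurd hr (by simp)
  | cons j js ih =>
    intro r hr hnd
    have hnd1 := List.nodup_cons.mp hnd
    by_cases hrj : j = r
    · subst hrj
      have htail : (js.map (fun j' => if (j', g j') = (j, x) then (1:Int) else 0)).sum = 0 := by
        apply List.sum_eq_zero
        intro y hy
        rcases List.mem_map.mp hy with ⟨j', hj', rfl⟩
        have hne : j' ≠ j := fun h => hnd1.1 (h ▸ hj')
        simp [Prod.ext_iff, hne]
      rw [List.map_cons, List.sum_cons, htail, add_zero]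
      by_cases hgx : g j = x <;> simp [Prod.ext_iff, hgx]
    · have hmem : r ∈ js := by
        rcases List.mem_cons.mp hr with h | h
        · exact absurd h.symm hrj
        · exact h
      rw [List.map_cons, List.sum_cons, ih r hmem hnd1.2]
      simp [Prod.ext_iff, hrj]

-- counting in a key stream extended by one pair: the old count plus a point indicator
lemma pvCountSnoc (A : List (Int × Int)) (r x : Int) (g : Int → Int) :
    ∀ j ∈ PySem.List.pyRange 0 40 1,
      (((A ++ [(r, x)]).count (j, g j) : Int))
      = ((A.count (j, g j)) : Int) + (if (j, g j) = (r, x) then (1:Int) else 0) := by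
  intro j hj
  by_cases h : ((j, g j) : Int × Int) = (r, x)
  · simp [List.count_append, h]
  · have hb : ¬ (((r, x) : Int × Int) = (j, g j)) := fun he => h he.symm
    simp [List.count_append, hb, h]

-- B's 40-bucket lookup sum equals the modular score, for a pattern whose period divides 40
lemma pvPatScore_eq (p : List Int) (hd : p.length ∣ 40) :
    ∀ (l : List Int), pvPatScore (pvCnt l) p = pvScore p l := by
  intro l
  unfold pvPatScore
  simp only [pvCnt_getD]
  rw [PySem.List.foldl_add]
  rw [zero_add]
  induction l using List.reverseRecOn with
  | nil => simp [pvKeys, pvScore, PySem.List.enumerate]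
  | append_singleton xs x ih =>
    have hkeys : pvKeys (xs ++ [x]) = pvKeys xs ++ [(((xs.length % 40 : Nat) : Int), x)] := by
      unfold pvKeys
      rw [PySem.List.enumerate_append]
      simp [PySem.List.enumerate]
    have hmap := pvCountSnoc (pvKeys xs) (((xs.length % 40 : Nat) : Int)) x
      (fun j => PySem.List.pyGetD p (PySem.Int.mod j (p.length : Int)) 0)
    rw [hkeys, List.map_congr_left hmap, PySem.List.sum_map_add_int, ih, pvScore_append]
    have hmem : (((xs.length % 40 : Nat) : Int)) ∈ PySem.List.pyRange 0 40 1 := by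
      rw [PySem.List.mem_pyRange_one]
      have := Nat.mod_lt xs.length (show 0 < 40 by omega)
      omega
    have hnd : (PySem.List.pyRange 0 40 1).Nodup := PySem.List.nodup_pyRange_one 0 40
    rw [pvSumInd _ x _ _ hmem hnd]
    have hg : PySem.List.pyGetD p (PySem.Int.mod (((xs.length % 40 : Nat) : Int)) (p.length : Int)) 0
        = PySem.List.pyGetD p ((xs.length % p.length : Nat) : Int) 0 := by
      rw [PySem.Int.mod_natCast]
      rw [Nat.mod_mod_of_dvd _ hd]
    rw [hg]
    split_ifs with h1 h2 h2
    · ring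
    · exact absurd h1.symm h2
    · exact absurd h2.symm h1
    · ring

lemma pvSelect (s1 s2 s3 : Int) :
    (if max s1 (max s2 s3) = s3 then
      (if max s1 (max s2 s3) = s2 then
          (if s2 ≤ s1 ∧ s3 ≤ s1 then ([1]:List Int) else []) ++ [2]
        else if s2 ≤ s1 ∧ s3 ≤ s1 then [1] else []) ++ [3]
    else
      if max s1 (max s2 s3) = s2 then
        (if s2 ≤ s1 ∧ s3 ≤ s1 then [1] else []) ++ [2]
      else if s2 ≤ s1 ∧ s3 ≤ s1 then [1] else [])
    = List.map (fun x => x.1 + 1)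
        (List.filter (fun x => decide (x.2 = max s1 (max s2 s3)))
          [((0:Int), s1), (1, s2), (2, s3)]) := by
  simp only [List.filter_cons, List.filter_nil, decide_eq_true_eq]
  split_ifs <;> first | (exfalso; omega) | simp

theorem pvFinal (l : List Int) (h : l.length ≤ 10000) : solution l = solution_alt l := by
  have hm := pvMain l h 0 0 0
  simp only [zero_add] at hm
  have e1 := pvPatScore_eq [1,2,3,4,5] (by decide) l
  have e2 := pvPatScore_eq [2,1,2,3,2,4,2,5] (by decide) l
  have e3 := pvPatScore_eq [3,3,1,1,2,2,4,4,5,5] (by decide) l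
  simp only [solution, solution_alt, hm, List.map_cons, List.map_nil, e1, e2, e3,
    PySem.List.max?_id_cons, List.foldl_cons, List.foldl_nil, Option.getD_some,
    PySem.List.enumerate_cons, PySem.List.enumerate_nil]
  norm_num
  exact pvSelect _ _ _

-- ===== VERDICT (by name: the statement is the Claim_ definition above) =====
theorem solution_spec : Claim_equal_solution := by
  intro answers _ hpre
  unfold Spec_solution
  unfold Pre_solution at hpre
  exact pvFinal answers hpre
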